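-- pv_equiv track=rewrite | github.com/permCoding/ege-22-23 | tasks/23/05a.py | get
-- ===== SOURCE A (Python) =====
-- def get(x, y):
--     lst = [0] * 100
--     lst[x] = 1
--     for i in range(x, y):
--         if i != 12:
--             lst[i+1] += lst[i]
--             lst[i+2] += lst[i]
--             lst[i*3] += lst[i]
--     return lst[y]
-- ===== SOURCE B (Python) =====
-- def get(x, y):
--     paths = [0] * 100
--     paths[y] = 1
--     for i in range(y - 1, x - 1, -1):
--         if i != 12:
--             paths[i] = paths[i + 1] + paths[i + 2] + paths[i * 3]
--     return paths[x]
-- ===== Notes on version B (the rewrite author's own statement) =====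
-- stated objective: alternative
-- what changed: A pushes path counts forward from x (lst[i+1]/lst[i+2]/lst[i*3] += lst[i]); B pulls them backward from y (paths[i] = paths[i+1]+paths[i+2]+paths[i*3], looping i from y-1 down to x), maintaining 'paths from i to y' instead of 'paths reaching i from x'.
import Mathlib
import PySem

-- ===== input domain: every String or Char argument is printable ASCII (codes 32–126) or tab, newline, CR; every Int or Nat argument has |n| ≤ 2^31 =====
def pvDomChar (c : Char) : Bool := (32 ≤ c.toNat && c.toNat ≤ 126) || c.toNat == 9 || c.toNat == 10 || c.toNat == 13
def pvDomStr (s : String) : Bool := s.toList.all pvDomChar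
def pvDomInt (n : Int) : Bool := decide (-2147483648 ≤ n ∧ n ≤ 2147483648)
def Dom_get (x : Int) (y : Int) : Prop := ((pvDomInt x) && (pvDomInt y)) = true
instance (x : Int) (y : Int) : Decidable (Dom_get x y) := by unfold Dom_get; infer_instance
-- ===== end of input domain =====

-- B re-implements A's forward 'push' DP as the mirror backward 'pull' DP over the same
-- size-100 table; the return values are proved equal on every input where the Python A returns.

-- ===== PORT A =====
-- loop body of A ('if i != 12: lst[i+1]+=lst[i]; lst[i+2]+=lst[i]; lst[i*3]+=lst[i]')
def stepA (lst : List Int) (i : Int) : List Int :=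
  if i ≠ 12 then
    let lst1 := PySem.List.pySetD lst (i+1)
      (PySem.List.pyGetD lst (i+1) 0 + PySem.List.pyGetD lst i 0)
    let lst2 := PySem.List.pySetD lst1 (i+2)
      (PySem.List.pyGetD lst1 (i+2) 0 + PySem.List.pyGetD lst1 i 0)
    PySem.List.pySetD lst2 (i*3)
      (PySem.List.pyGetD lst2 (i*3) 0 + PySem.List.pyGetD lst2 i 0)
  else lst

-- indexing (incl. Python's negative-index wraparound) is exact via pySetD/pyGetD;
-- Pre_get admits exactly the inputs where no IndexError occurs
def get (x : Int) (y : Int) : Int :=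
  let lst := List.replicate 100 (0 : Int)
  let lst := PySem.List.pySetD lst x 1
  let lst := (PySem.List.pyRange x y 1).foldl stepA lst
  PySem.List.pyGetD lst y 0

-- ===== PORT B =====
-- loop body of B ('if i != 12: paths[i] = paths[i+1] + paths[i+2] + paths[i*3]')
def stepB (paths : List Int) (i : Int) : List Int :=
  if i ≠ 12 then
    PySem.List.pySetD paths i
      (PySem.List.pyGetD paths (i+1) 0 + PySem.List.pyGetD paths (i+2) 0
        + PySem.List.pyGetD paths (i*3) 0)
  else paths

def get_alt (x : Int) (y : Int) : Int :=
  let paths := List.replicate 100 (0 : Int)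
  let paths := PySem.List.pySetD paths y 1
  let paths := (PySem.List.pyRange (y-1) (x-1) (-1)).foldl stepB paths
  PySem.List.pyGetD paths x 0

-- ===== PRECONDITION & SPEC =====
-- Pre_get is exactly the set of inputs on which the Python A returns normally; everywhere
-- else A raises IndexError (on lst[x], lst[i+1], lst[i+2], lst[i*3] or lst[y]).
def Pre_get (x : Int) (y : Int) : Prop :=
  (-100 ≤ x ∧ x ≤ 99 ∧ -100 ≤ y ∧ y ≤ 99 ∧ y ≤ x) ∨ (x < y ∧ -33 ≤ x ∧ y ≤ 34)
instance (x : Int) (y : Int) : Decidable (Pre_get x y) := by unfold Pre_get; infer_instance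

def pvWitness_get : Int × Int := (3, 20)

def Spec_get (x : Int) (y : Int) (out : Int) : Prop := out = get_alt x y
instance (x : Int) (y : Int) (out : Int) : Decidable (Spec_get x y out) := by unfold Spec_get; infer_instance

-- ===== CLAIM (what is proved, stated in full; the proofs are below) =====
def Claim_equal_get : Prop := ∀ (x : Int) (y : Int), Dom_get x y → Pre_get x y → Spec_get x y (get x y)

-- ===== LEMMAS AND PROOFS =====

-- Python's index normalisation for a length-100 list
def normI (p : Int) : Nat := if 0 ≤ p then p.toNat else 100 - (-p).toNat

lemma normI_lt (p : Int) (h1 : -100 ≤ p) (h2 : p < 100) : normI p < 100 := by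
  unfold normI; split <;> omega

lemma normI_cast (p : Int) (h1 : -100 ≤ p) (h2 : p < 100) :
    (normI p : Int) = if 0 ≤ p then p else p + 100 := by
  unfold normI; split <;> omega

lemma normI_cases (a b : Int) (ha1 : -100 ≤ a) (ha2 : a < 100) (hb1 : -100 ≤ b) (hb2 : b < 100)
    (h : normI a = normI b) : a = b ∨ a = b + 100 ∨ a = b - 100 := by
  have h' : (normI a : Int) = (normI b : Int) := by exact_mod_cast h
  rw [normI_cast a ha1 ha2, normI_cast b hb1 hb2] at h'
  split_ifs at h' <;> omega

lemma normI_inj (a b : Int) (ha1 : -100 ≤ a) (ha2 : a < 100) (hb1 : -100 ≤ b) (hb2 : b < 100)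
    (hw1 : a - b < 100) (hw2 : b - a < 100) (h : normI a = normI b) : a = b := by
  rcases normI_cases a b ha1 ha2 hb1 hb2 h with h' | h' | h' <;> omega

lemma pyIdx100 (p : Int) (h1 : -100 ≤ p) (h2 : p < 100) :
    PySem.List.pyIdx? 100 p = some (normI p) := by
  unfold PySem.List.pyIdx? normI
  split_ifs with ha hb hc <;> first
    | rfl
    | omega

lemma pyGetD_norm (S : List Int) (hS : S.length = 100) (p : Int)
    (h1 : -100 ≤ p) (h2 : p < 100) :
    PySem.List.pyGetD S p 0 = S.getD (normI p) 0 := by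
  unfold PySem.List.pyGetD PySem.List.pyGet?
  rw [hS, pyIdx100 p h1 h2, List.getD_eq_getElem?_getD]
  rfl

lemma pySetD_norm (S : List Int) (hS : S.length = 100) (p : Int) (v : Int)
    (h1 : -100 ≤ p) (h2 : p < 100) :
    PySem.List.pySetD S p v = S.set (normI p) v := by
  unfold PySem.List.pySetD PySem.List.pySet?
  rw [hS, pyIdx100 p h1 h2]
  rfl

lemma getD_set_self (S : List Int) (c : Nat) (v : Int) (hc : c < S.length) :
    (S.set c v).getD c 0 = v := by
  rw [List.getD_eq_getElem?_getD, List.getElem?_set_self hc]; rfl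

lemma getD_set_ne (S : List Int) (c j : Nat) (v : Int) (h : j ≠ c) :
    (S.set c v).getD j 0 = S.getD j 0 := by
  rw [List.getD_eq_getElem?_getD, List.getElem?_set_ne (Ne.symm h), ← List.getD_eq_getElem?_getD]

lemma getD_replicate (c : Nat) : (List.replicate 100 (0:Int)).getD c 0 = 0 := by
  rw [List.getD_eq_getElem?_getD, List.getElem?_replicate]
  split <;> rfl

-- number of paths from position (y - n) to y; the Python table is cyclic over 100 cells,
-- so the *3 move can land on the position shifted by ±100
def Fb (y : Int) : Nat → Int
  | 0 => 1
  | n + 1 =>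
    if y - (n + 1 : Nat) = 12 then 0
    else
      Fb y n
      + (if n = 0 then 0 else Fb y (n - 1))
      + (if h1 : y - (n + 1 : Nat) < 3*(y - (n + 1 : Nat)) ∧ 3*(y - (n + 1 : Nat)) ≤ y then
           Fb y (y - 3*(y - (n + 1 : Nat))).toNat
         else if h2 : y - (n + 1 : Nat) < 3*(y - (n + 1 : Nat)) + 100 ∧ 3*(y - (n + 1 : Nat)) + 100 ≤ y then
           Fb y (y - (3*(y - (n + 1 : Nat)) + 100)).toNat
         else if h3 : y - (n + 1 : Nat) < 3*(y - (n + 1 : Nat)) - 100 ∧ 3*(y - (n + 1 : Nat)) - 100 ≤ y then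
           Fb y (y - (3*(y - (n + 1 : Nat)) - 100)).toNat
         else 0)
  decreasing_by all_goals omega

lemma Fb_zero (y : Int) : Fb y 0 = 1 := by rw [Fb]

lemma Fb_12 (y : Int) (h : 12 < y) : Fb y (y - 12).toNat = 0 := by
  obtain ⟨n, hn1, hn2⟩ : ∃ n : Nat, (y - 12).toNat = n + 1 ∧ y - ((n : Int) + 1) = 12 :=
    ⟨(y - 13).toNat, by omega, by omega⟩
  rw [hn1, Fb]
  push_cast
  rw [if_pos hn2]

lemma Fb_step (y t : Int) (ht : t < y) (h12 : t ≠ 12) :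
    Fb y (y - t).toNat =
      Fb y (y - (t+1)).toNat
      + (if t + 2 ≤ y then Fb y (y - (t+2)).toNat else 0)
      + (if t < 3*t ∧ 3*t ≤ y then Fb y (y - 3*t).toNat
         else if t < 3*t + 100 ∧ 3*t + 100 ≤ y then Fb y (y - (3*t + 100)).toNat
         else if t < 3*t - 100 ∧ 3*t - 100 ≤ y then Fb y (y - (3*t - 100)).toNat
         else 0) := by
  obtain ⟨n, hn1, hn2⟩ : ∃ n : Nat, (y - t).toNat = n + 1 ∧ y - ((n : Int) + 1) = t :=
    ⟨(y - t - 1).toNat, by omega, by omega⟩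
  rw [hn1, Fb]
  push_cast
  rw [hn2, if_neg h12]
  congr 1
  congr 1
  · rw [show n = (y - (t+1)).toNat by omega]
  · by_cases hn : n = 0
    · rw [if_pos hn, if_neg (by omega)]
    · rw [if_neg hn, if_pos (by omega), show n - 1 = (y - (t+2)).toNat by omega]

-- value that B's finished table holds in cell c once all positions > s are computed
def cellval (y s c : Int) : Int :=
  if s < c ∧ c ≤ y then Fb y (y - c).toNat
  else if s < c - 100 ∧ c - 100 ≤ y then Fb y (y - (c - 100)).toNat
  else 0

-- reading position p from a table in state s returns the three-way chain
lemma read_cell (y s p : Int) (hp1 : -100 ≤ p) (hp2 : p < 100)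
    (hy : y ≤ 34) (hs : -34 ≤ s)
    (S : List Int) (hS : S.length = 100)
    (hin : ∀ c : Nat, c < 100 → S.getD c 0 = cellval y s (c : Int)) :
    PySem.List.pyGetD S p 0 =
      (if s < p ∧ p ≤ y then Fb y (y - p).toNat
       else if s < p + 100 ∧ p + 100 ≤ y then Fb y (y - (p + 100)).toNat
       else if s < p - 100 ∧ p - 100 ≤ y then Fb y (y - (p - 100)).toNat
       else 0) := by
  rw [pyGetD_norm S hS p hp1 hp2, hin (normI p) (normI_lt p hp1 hp2)]
  rw [normI_cast p hp1 hp2]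
  unfold cellval
  by_cases h0 : 0 ≤ p
  · rw [if_pos h0]
    split_ifs <;> first | rfl | omega
  · rw [if_neg h0]
    split_ifs <;> first | rfl | omega | (congr 1; omega)

lemma stepB_length (S : List Int) (i : Int) : (stepB S i).length = S.length := by
  unfold stepB
  split
  · rw [PySem.List.length_pySetD]
  · rfl

lemma foldlB_length (l : List Int) (S : List Int) :
    (l.foldl stepB S).length = S.length := by
  induction l generalizing S with
  | nil => rfl
  | cons a l ih => rw [List.foldl_cons, ih, stepB_length]

-- one pull step turns a state-s table into a state-(s-1) table
lemma stepB_cell (y s : Int) (S : List Int) (hS : S.length = 100)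
    (h0 : -33 ≤ s) (hsy : s ≤ y - 1) (hy : y ≤ 34)
    (hin : ∀ c : Nat, c < 100 → S.getD c 0 = cellval y s (c : Int)) :
    ∀ c : Nat, c < 100 → (stepB S s).getD c 0 = cellval y (s - 1) (c : Int) := by
  intro c hc
  have hccast : (c : Int) < 100 := by exact_mod_cast hc
  unfold stepB
  by_cases h12 : s = 12
  · rw [if_neg (by simp [h12])]
    rw [hin c hc]
    subst h12
    by_cases hcy : (c : Int) = 12
    · unfold cellval
      rw [hcy]
      rw [if_neg (by omega), if_neg (by omega),
        if_pos (show (12:Int) - 1 < 12 ∧ (12:Int) ≤ y by omega)]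
      exact (Fb_12 y (by omega)).symm
    · unfold cellval
      split_ifs <;> first | rfl | (exfalso; omega)
  · rw [if_pos h12]
    have hr1 := read_cell y s (s+1) (by omega) (by omega) hy (by omega) S hS hin
    have hr2 := read_cell y s (s+2) (by omega) (by omega) hy (by omega) S hS hin
    have hr3 := read_cell y s (3*s) (by omega) (by omega) hy (by omega) S hS hin
    have hmul : s * 3 = 3 * s := by ring
    rw [hmul, hr1, hr2, hr3, pySetD_norm S hS s _ (by omega) (by omega)]
    by_cases hcs : c = normI s
    · subst hcs
      rw [getD_set_self S (normI s) _ (by rw [hS]; exact normI_lt s (by omega) (by omega))]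
      have hv : (if s < s + 1 ∧ s + 1 ≤ y then Fb y (y - (s+1)).toNat
           else if s < s + 1 + 100 ∧ s + 1 + 100 ≤ y then Fb y (y - (s + 1 + 100)).toNat
           else if s < s + 1 - 100 ∧ s + 1 - 100 ≤ y then Fb y (y - (s + 1 - 100)).toNat
           else 0)
          + (if s < s + 2 ∧ s + 2 ≤ y then Fb y (y - (s+2)).toNat
           else if s < s + 2 + 100 ∧ s + 2 + 100 ≤ y then Fb y (y - (s + 2 + 100)).toNat
           else if s < s + 2 - 100 ∧ s + 2 - 100 ≤ y then Fb y (y - (s + 2 - 100)).toNat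
           else 0)
          + (if s < 3*s ∧ 3*s ≤ y then Fb y (y - 3*s).toNat
           else if s < 3*s + 100 ∧ 3*s + 100 ≤ y then Fb y (y - (3*s + 100)).toNat
           else if s < 3*s - 100 ∧ 3*s - 100 ≤ y then Fb y (y - (3*s - 100)).toNat
           else 0) = Fb y (y - s).toNat := by
        rw [Fb_step y s (by omega) h12]
        congr 1
        congr 1
        · rw [if_pos (show s < s + 1 ∧ s + 1 ≤ y by omega)]
        · split_ifs <;> first | rfl | (exfalso; omega)
      rw [hv]
      rw [normI_cast s (by omega) (by omega)]
      by_cases hs0 : 0 ≤ s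
      · rw [if_pos hs0]
        unfold cellval
        rw [if_pos (show s - 1 < s ∧ s ≤ y by omega)]
      · rw [if_neg hs0]
        unfold cellval
        rw [if_neg (by omega), if_pos (show s - 1 < s + 100 - 100 ∧ s + 100 - 100 ≤ y by omega)]
        congr 1
        omega
    · rw [getD_set_ne S (normI s) c _ hcs]
      rw [hin c hc]
      have hne1 : (c : Int) ≠ (if 0 ≤ s then s else s + 100) := by
        intro hcontra
        apply hcs
        have : (c : Int) = (normI s : Int) := by rw [normI_cast s (by omega) (by omega)]; exact hcontra
        exact_mod_cast this
      unfold cellval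
      by_cases hs0 : 0 ≤ s
      · rw [if_pos hs0] at hne1
        split_ifs <;> first | rfl | (exfalso; omega)
      · rw [if_neg hs0] at hne1
        split_ifs <;> first | rfl | (exfalso; omega)

-- B's loop establishes the state-(t-1) table
lemma Binv (y : Int) (hy : y ≤ 34) :
    ∀ (n : Nat) (s t : Int) (S : List Int), S.length = 100 →
      -33 ≤ t → t ≤ s + 1 → s ≤ y - 1 → (s + 1 - t).toNat = n →
      (∀ c : Nat, c < 100 → S.getD c 0 = cellval y s (c : Int)) →
      (∀ c : Nat, c < 100 →
        ((PySem.List.pyRange s (t-1) (-1)).foldl stepB S).getD c 0 = cellval y (t-1) (c : Int)) := by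
  intro n
  induction n with
  | zero =>
    intro s t S hS ht hts hsy hfuel hin c hc
    rw [PySem.List.pyRange_neg_one_eq_nil (by omega : s ≤ t - 1), List.foldl_nil]
    rw [hin c hc, show t - 1 = s by omega]
  | succ n ih =>
    intro s t S hS ht hts hsy hfuel hin c hc
    rw [PySem.List.pyRange_neg_one_cons (by omega : t - 1 < s), List.foldl_cons]
    exact ih (s-1) t (stepB S s) (by rw [stepB_length, hS]) ht (by omega) (by omega) (by omega)
      (stepB_cell y s S hS (by omega) hsy hy hin) c hc

-- ===== A side =====

-- A-side weighted sum: mass still waiting at positions [t, y], weighted by paths-to-y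
def SA (y : Int) (S : List Int) (t : Int) : Int :=
  ((PySem.List.pyRange t (y+1) 1).map
    (fun p => S.getD (normI p) 0 * Fb y (y - p).toNat)).sum

lemma SA_congr (y : Int) (S S' : List Int) (t : Int)
    (h : ∀ p : Int, t ≤ p → p ≤ y → S'.getD (normI p) 0 = S.getD (normI p) 0) :
    SA y S' t = SA y S t := by
  unfold SA
  congr 1
  apply List.map_congr_left
  intro p hp
  rw [PySem.List.mem_pyRange_one] at hp
  rw [h p hp.1 (by omega)]

lemma SA_split (y : Int) (S : List Int) (t : Int) (h : t ≤ y) :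
    SA y S t = S.getD (normI t) 0 * Fb y (y - t).toNat + SA y S (t + 1) := by
  unfold SA
  rw [PySem.List.pyRange_one_cons (by omega : t < y + 1), List.map_cons, List.sum_cons]

lemma SA_set_miss (y t : Int) (S : List Int) (c : Nat) (v : Int)
    (h : ∀ p : Int, t ≤ p → p ≤ y → normI p ≠ c) :
    SA y (S.set c v) t = SA y S t := by
  apply SA_congr
  intro p hp1 hp2
  exact getD_set_ne S c (normI p) v (h p hp1 hp2)

lemma SA_set_hit (y t q : Int) (S : List Int) (hS : S.length = 100) (v : Int)
    (ht : -100 ≤ t) (hy : y ≤ 99) (hq1 : t ≤ q) (hq2 : q ≤ y)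
    (huniq : ∀ p : Int, t ≤ p → p ≤ y → normI p = normI q → p = q) :
    SA y (S.set (normI q) v) t
      = SA y S t + (v - S.getD (normI q) 0) * Fb y (y - q).toNat := by
  unfold SA
  rw [PySem.List.pyRange_one_append t q (y+1) hq1 (by omega),
    PySem.List.pyRange_one_cons (by omega : q < y + 1)]
  simp only [List.map_append, List.map_cons, List.sum_append, List.sum_cons]
  rw [getD_set_self S (normI q) v (by rw [hS]; exact normI_lt q (by omega) (by omega))]
  have hlow : ((PySem.List.pyRange t q 1).map
      (fun p => (S.set (normI q) v).getD (normI p) 0 * Fb y (y - p).toNat)).sum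
      = ((PySem.List.pyRange t q 1).map
      (fun p => S.getD (normI p) 0 * Fb y (y - p).toNat)).sum := by
    congr 1
    apply List.map_congr_left
    intro p hp
    rw [PySem.List.mem_pyRange_one] at hp
    rw [getD_set_ne S (normI q) (normI p) v
      (fun hpq => by have := huniq p hp.1 (by omega) hpq; omega)]
  have hhigh : ((PySem.List.pyRange (q+1) (y+1) 1).map
      (fun p => (S.set (normI q) v).getD (normI p) 0 * Fb y (y - p).toNat)).sum
      = ((PySem.List.pyRange (q+1) (y+1) 1).map
      (fun p => S.getD (normI p) 0 * Fb y (y - p).toNat)).sum := by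
    congr 1
    apply List.map_congr_left
    intro p hp
    rw [PySem.List.mem_pyRange_one] at hp
    rw [getD_set_ne S (normI q) (normI p) v
      (fun hpq => by have := huniq p (by omega) (by omega) hpq; omega)]
  rw [hlow, hhigh]
  ring

lemma stepA_sum (y t : Int) (S : List Int) (hS : S.length = 100)
    (hx : -33 ≤ t) (hty : t < y) (hy : y ≤ 34) :
    SA y (stepA S t) (t + 1) = SA y S t := by
  unfold stepA
  by_cases h12 : t = 12
  · rw [if_neg (by simp [h12])]
    rw [SA_split y S t (by omega), h12, Fb_12 y (by omega)]
    subst h12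
    ring
  · rw [if_pos h12]
    dsimp only
    have hb1 : -100 ≤ t := by omega
    have hb2 : t < 100 := by omega
    rw [pySetD_norm S hS (t+1) _ (by omega) (by omega),
      pyGetD_norm S hS (t+1) (by omega) (by omega), pyGetD_norm S hS t hb1 hb2]
    set v := S.getD (normI t) 0 with hv
    set S1 := S.set (normI (t+1)) (S.getD (normI (t+1)) 0 + v) with hS1def
    have hlen1 : S1.length = 100 := by rw [hS1def, List.length_set, hS]
    have hinj2 : normI (t+2) ≠ normI (t+1) :=
      fun h => by have := normI_cases (t+2) (t+1) (by omega) (by omega) (by omega) (by omega) h; omega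
    have hinjt1 : normI t ≠ normI (t+1) :=
      fun h => by have := normI_cases t (t+1) (by omega) (by omega) (by omega) (by omega) h; omega
    have hg1_t : PySem.List.pyGetD S1 t 0 = v := by
      rw [pyGetD_norm S1 hlen1 t hb1 hb2, hS1def, getD_set_ne _ _ _ _ hinjt1]
    have hg1_t2 : PySem.List.pyGetD S1 (t+2) 0 = S.getD (normI (t+2)) 0 := by
      rw [pyGetD_norm S1 hlen1 (t+2) (by omega) (by omega), hS1def, getD_set_ne _ _ _ _ hinj2]
    rw [pySetD_norm S1 hlen1 (t+2) _ (by omega) (by omega), hg1_t, hg1_t2]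
    set S2 := S1.set (normI (t+2)) (S.getD (normI (t+2)) 0 + v) with hS2def
    have hlen2 : S2.length = 100 := by rw [hS2def, List.length_set, hlen1]
    have hinjt2 : normI t ≠ normI (t+2) :=
      fun h => by have := normI_cases t (t+2) (by omega) (by omega) (by omega) (by omega) h; omega
    have hg2_t : PySem.List.pyGetD S2 t 0 = v := by
      rw [pyGetD_norm S2 hlen2 t hb1 hb2, hS2def, getD_set_ne _ _ _ _ hinjt2, hS1def,
        getD_set_ne _ _ _ _ hinjt1]
    rw [show t * 3 = 3 * t by ring, pySetD_norm S2 hlen2 (3*t) _ (by omega) (by omega), hg2_t]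
    set w3 := PySem.List.pyGetD S2 (3*t) 0 with hw3
    have hop1 : SA y S1 (t+1) = SA y S (t+1) + v * Fb y (y - (t+1)).toNat := by
      rw [hS1def, SA_set_hit y (t+1) (t+1) S hS _ (by omega) (by omega) (le_refl _) (by omega)
        (fun p hp1 hp2 hpq => normI_inj p (t+1) (by omega) (by omega) (by omega) (by omega)
          (by omega) (by omega) hpq)]
      ring
    have hop2 : SA y S2 (t+1) = SA y S1 (t+1) + (if t + 2 ≤ y then v * Fb y (y - (t+2)).toNat else 0) := by
      by_cases h2y : t + 2 ≤ y
      · rw [if_pos h2y, hS2def, SA_set_hit y (t+1) (t+2) S1 hlen1 _ (by omega) (by omega)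
          (by omega) (by omega)
          (fun p hp1 hp2 hpq => normI_inj p (t+2) (by omega) (by omega) (by omega) (by omega)
            (by omega) (by omega) hpq)]
        rw [hS1def, getD_set_ne _ _ _ _ hinj2]
        ring
      · rw [if_neg h2y, hS2def, SA_set_miss y (t+1) S1 (normI (t+2)) _
          (fun p hp1 hp2 hpq => by
            have := normI_cases p (t+2) (by omega) (by omega) (by omega) (by omega) hpq
            omega), add_zero]
    have hop3 : SA y (S2.set (normI (3*t)) (w3 + v)) (t+1)
        = SA y S2 (t+1) +
          (if t < 3*t ∧ 3*t ≤ y then v * Fb y (y - 3*t).toNat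
           else if t < 3*t + 100 ∧ 3*t + 100 ≤ y then v * Fb y (y - (3*t + 100)).toNat
           else 0) := by
      by_cases hc1 : t < 3*t ∧ 3*t ≤ y
      · rw [if_pos hc1, SA_set_hit y (t+1) (3*t) S2 hlen2 _ (by omega) (by omega)
          (by omega) (by omega)
          (fun p hp1 hp2 hpq => by
            have := normI_cases p (3*t) (by omega) (by omega) (by omega) (by omega) hpq
            omega)]
        have hw : w3 = S2.getD (normI (3*t)) 0 := by
          rw [hw3, pyGetD_norm S2 hlen2 (3*t) (by omega) (by omega)]
        rw [hw]
        ring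
      · rw [if_neg hc1]
        by_cases hc2 : t < 3*t + 100 ∧ 3*t + 100 ≤ y
        · rw [if_pos hc2]
          have hcell : normI (3*t) = normI (3*t + 100) := by
            have h3neg : 3*t < 0 := by omega
            unfold normI
            split_ifs <;> omega
          rw [hcell, SA_set_hit y (t+1) (3*t+100) S2 hlen2 _ (by omega) (by omega)
            (by omega) (by omega)
            (fun p hp1 hp2 hpq => by
              have := normI_cases p (3*t+100) (by omega) (by omega) (by omega) (by omega) hpq
              omega)]
          have hw : w3 = S2.getD (normI (3*t+100)) 0 := by
            rw [hw3, pyGetD_norm S2 hlen2 (3*t) (by omega) (by omega), hcell]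
          rw [hw]
          ring
        · rw [if_neg hc2, SA_set_miss y (t+1) S2 (normI (3*t)) _
            (fun p hp1 hp2 hpq => by
              have := normI_cases p (3*t) (by omega) (by omega) (by omega) (by omega) hpq
              omega), add_zero]
    rw [hop3, hop2, hop1, SA_split y S t (by omega), Fb_step y t hty h12]
    split_ifs <;> (try (exfalso; omega)) <;> ring

lemma stepA_length (S : List Int) (i : Int) : (stepA S i).length = S.length := by
  unfold stepA
  split
  · simp only [PySem.List.length_pySetD]
  · rfl

lemma Ainv (y : Int) (hy : y ≤ 34) :
    ∀ (n : Nat) (s : Int) (S : List Int), S.length = 100 → -33 ≤ s → s ≤ y →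
      (y - s).toNat = n →
      PySem.List.pyGetD ((PySem.List.pyRange s y 1).foldl stepA S) y 0 = SA y S s := by
  intro n
  induction n with
  | zero =>
    intro s S hS hs1 hs2 hfuel
    have hsy : s = y := by omega
    subst hsy
    rw [PySem.List.pyRange_one_eq_nil (le_refl s), List.foldl_nil]
    unfold SA
    rw [PySem.List.pyRange_one_singleton, List.map_cons, List.map_nil, List.sum_cons,
      List.sum_nil, show s - s = 0 by omega]
    rw [pyGetD_norm S hS s (by omega) (by omega)]
    simp [Fb_zero]
  | succ n ih =>
    intro s S hS hs1 hs2 hfuel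
    rw [PySem.List.pyRange_one_cons (by omega : s < y), List.foldl_cons]
    rw [ih (s+1) (stepA S s) (by rw [stepA_length, hS]) (by omega) (by omega) (by omega)]
    exact stepA_sum y s S hS hs1 (by omega) hy

lemma SA_repl (y t : Int) : SA y (List.replicate 100 (0:Int)) t = 0 := by
  unfold SA
  apply List.sum_eq_zero
  intro z hz
  rw [List.mem_map] at hz
  obtain ⟨p, _, rfl⟩ := hz
  rw [getD_replicate, zero_mul]

-- the y ≤ x case: both programs just write one cell and read another
lemma sym_case (u v : Int) (hu1 : -100 ≤ u) (hu2 : u ≤ 99) (hv1 : -100 ≤ v) (hv2 : v ≤ 99) :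
    PySem.List.pyGetD (PySem.List.pySetD (List.replicate 100 (0:Int)) u 1) v 0
      = if normI v = normI u then 1 else 0 := by
  rw [pySetD_norm _ (by simp) u 1 hu1 (by omega)]
  rw [pyGetD_norm _ (by simp) v hv1 (by omega)]
  by_cases h : normI v = normI u
  · rw [if_pos h, h, getD_set_self _ _ _ (by simp; exact normI_lt u hu1 (by omega))]
  · rw [if_neg h, getD_set_ne _ _ _ _ h, getD_replicate]

-- initial table of B is the state-(y-1) table
lemma init_cell (y : Int) (hy1 : -33 < y) (hy2 : y ≤ 34) :
    ∀ c : Nat, c < 100 →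
      ((List.replicate 100 (0:Int)).set (normI y) 1).getD c 0 = cellval y (y-1) (c : Int) := by
  intro c hc
  have hccast : (c : Int) < 100 := by exact_mod_cast hc
  by_cases h : c = normI y
  · subst h
    rw [getD_set_self _ _ _ (by simp; exact normI_lt y (by omega) (by omega))]
    rw [normI_cast y (by omega) (by omega)]
    unfold cellval
    by_cases h0 : 0 ≤ y
    · rw [if_pos h0, if_pos (by constructor <;> omega), show (y - y).toNat = 0 by omega, Fb_zero]
    · rw [if_neg h0, if_neg (by omega), if_pos (by constructor <;> omega),
        show (y - (y + 100 - 100)).toNat = 0 by omega, Fb_zero]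
  · rw [getD_set_ne _ _ _ _ h, getD_replicate]
    have hne : (c : Int) ≠ (if 0 ≤ y then y else y + 100) := by
      intro hcontra
      apply h
      have : (c : Int) = (normI y : Int) := by rw [normI_cast y (by omega) (by omega)]; exact hcontra
      exact_mod_cast this
    unfold cellval
    by_cases h0 : 0 ≤ y
    · rw [if_pos h0] at hne
      split_ifs <;> omega
    · rw [if_neg h0] at hne
      split_ifs <;> omega

-- final read of B is Fb y (y-x)
lemma final_cell (y x : Int) (hx : -33 ≤ x) (hxy : x < y) (hy : y ≤ 34)
    (L : List Int) (hL : L.length = 100)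
    (hcell : ∀ c : Nat, c < 100 → L.getD c 0 = cellval y (x-1) (c : Int)) :
    PySem.List.pyGetD L x 0 = Fb y (y - x).toNat := by
  rw [pyGetD_norm L hL x (by omega) (by omega)]
  rw [hcell (normI x) (normI_lt x (by omega) (by omega))]
  rw [normI_cast x (by omega) (by omega)]
  unfold cellval
  by_cases h0 : 0 ≤ x
  · rw [if_pos h0, if_pos (by constructor <;> omega)]
  · rw [if_neg h0, if_neg (by omega), if_pos (by constructor <;> omega)]
    congr 1
    omega

-- ===== VERDICT (by name: the statement is the Claim_ definition above) =====
theorem get_spec : Claim_equal_get := by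
  intro x y _ hpre
  unfold Spec_get _root_.get get_alt
  dsimp only
  rcases hpre with ⟨hx1, hx2, hy1, hy2, hyx⟩ | ⟨hxy, hx, hy⟩
  · -- y ≤ x : both loops are empty
    rw [PySem.List.pyRange_one_eq_nil hyx, PySem.List.pyRange_neg_one_eq_nil (by omega : y - 1 ≤ x - 1)]
    simp only [List.foldl_nil]
    rw [sym_case x y hx1 hx2 hy1 hy2, sym_case y x hy1 hy2 hx1 hx2]
    by_cases h : normI y = normI x
    · rw [if_pos h, if_pos h.symm]
    · rw [if_neg h, if_neg (fun hh => h hh.symm)]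
  · -- x < y : A's forward push and B's backward pull both compute Fb y (y-x)
    have hAinit : PySem.List.pySetD (List.replicate 100 (0:Int)) x 1
        = (List.replicate 100 (0:Int)).set (normI x) 1 :=
      pySetD_norm _ (by simp) x 1 (by omega) (by omega)
    have hBinit : PySem.List.pySetD (List.replicate 100 (0:Int)) y 1
        = (List.replicate 100 (0:Int)).set (normI y) 1 :=
      pySetD_norm _ (by simp) y 1 (by omega) (by omega)
    rw [hAinit, hBinit]
    -- A side
    rw [Ainv y hy ((y - x).toNat) x _ (by simp) hx (by omega) rfl]
    rw [SA_set_hit y x x (List.replicate 100 (0:Int)) (by simp) 1 (by omega) (by omega)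
      (le_refl x) (by omega)
      (fun p hp1 hp2 hpq => normI_inj p x (by omega) (by omega) (by omega) (by omega)
        (by omega) (by omega) hpq)]
    rw [SA_repl, getD_replicate]
    -- B side
    have hBfold := Binv y hy ((y - x).toNat) (y-1) x
      ((List.replicate 100 (0:Int)).set (normI y) 1)
      (by simp) hx (by omega) (by omega) (by omega)
      (init_cell y (by omega) hy)
    rw [final_cell y x hx hxy hy _
      (by rw [foldlB_length]; simp)
      (fun c hc => hBfold c hc)]
    ring
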